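-- pv_equiv track=rewrite | github.com/Leon209/Robustness-in-suffix-prediction | robustness/perturbator/perturbation_logic/activity_pertubator.py | _detect_loops_in_sequence
-- ===== SOURCE A (Python) =====
-- from typing import List, Tuple, Optional, Dict, Any, Iterable, Literal
--
-- def _detect_loops_in_sequence(
--     activity_sequence: List[str],
-- ) -> List[Tuple[int, int]]:
--     """
--     Detect all loops in an activity sequence.
--     A loop is a subsequence where the first and last activities are the same.
--     Single-activity repeats (e.g., B->B) are excluded.
--
--     Args:
--         activity_sequence: List of activity names
--
--     Returns:
--         List of (start_index, end_index) tuples for each loop found.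
--         end_index is inclusive.
--     """
--     loops = []
--     n = len(activity_sequence)
--
--     # Check all possible subsequences
--     for start in range(n):
--         start_activity = activity_sequence[start]
--         # Look for matching activity from start+1 onwards
--         for end in range(start + 1, n):
--             if activity_sequence[end] == start_activity:
--                 # Found a loop: from start to end (inclusive)
--                 # Exclude single-activity loops (start == end-1 means only one activity in between)
--                 if end - start >= 2:  # At least 2 activities: start_act -> ... -> start_act
--                     loops.append((start, end))
--
--     return loops
-- ===== SOURCE B (Python) =====
-- def _detect_loops_in_sequence(activity_sequence):
--     # Group indices by activity once, then per start index scan only the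
--     # same-activity index list instead of the whole tail of the sequence.
--     positions = {}
--     for i, act in enumerate(activity_sequence):
--         positions.setdefault(act, []).append(i)
--     loops = []
--     for i, act in enumerate(activity_sequence):
--         for j in positions[act]:
--             if j >= i + 2:
--                 loops.append((i, j))
--     return loops
-- ===== Notes on version B (the rewrite author's own statement) =====
-- stated objective: alternative
-- what changed: B builds a dict mapping each activity to its ascending index list in one pass, then for each start index scans only that activity's index list (keeping pairs with gap >= 2), instead of A's nested scan of the whole remaining tail for every start.
import Mathlib
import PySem

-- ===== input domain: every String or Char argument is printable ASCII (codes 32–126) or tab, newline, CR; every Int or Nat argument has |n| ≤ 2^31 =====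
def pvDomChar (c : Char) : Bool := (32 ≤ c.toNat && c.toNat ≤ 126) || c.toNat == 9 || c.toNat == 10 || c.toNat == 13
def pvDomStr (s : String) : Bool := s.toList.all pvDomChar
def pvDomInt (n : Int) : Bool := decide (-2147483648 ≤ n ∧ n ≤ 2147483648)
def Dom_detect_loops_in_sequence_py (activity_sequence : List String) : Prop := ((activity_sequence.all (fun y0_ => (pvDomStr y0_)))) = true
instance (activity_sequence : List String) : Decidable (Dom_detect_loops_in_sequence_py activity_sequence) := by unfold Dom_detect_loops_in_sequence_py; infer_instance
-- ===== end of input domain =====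

-- B groups indices by activity in a dict once and scans only same-activity indices per start; same return value as A.
-- ===== PORT A =====
def detect_loops_in_sequence_py (activity_sequence : List String) : List (Int × Int) :=
  let loops : List (Int × Int) := []
  let n := PySem.List.len activity_sequence
  (PySem.List.pyRange 0 n 1).foldl (fun loops start =>
    let start_activity := PySem.List.pyGetD activity_sequence start ""
    (PySem.List.pyRange (start + 1) n 1).foldl (fun loops e =>
      if PySem.List.pyGetD activity_sequence e "" == start_activity then
        if e - start ≥ 2 then loops ++ [(start, e)] else loops
      else loops) loops) loops

-- ===== PORT B =====
def detect_loops_in_sequence_py_alt (activity_sequence : List String) : List (Int × Int) :=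
  let positions : PySem.Dict String (List Int) :=
    (PySem.List.enumerate activity_sequence 0).foldl
      (fun d p => d.modify p.2 [] (· ++ [p.1])) PySem.Dict.empty
  let loops : List (Int × Int) := []
  (PySem.List.enumerate activity_sequence 0).foldl (fun loops p =>
    (positions.getD p.2 []).foldl (fun loops j =>
      if j ≥ p.1 + 2 then loops ++ [(p.1, j)] else loops) loops) loops

-- ===== PRECONDITION & SPEC =====
def Spec_detect_loops_in_sequence_py (activity_sequence : List String) (out : List (Int × Int)) : Prop := out = detect_loops_in_sequence_py_alt activity_sequence
instance (activity_sequence : List String) (out : List (Int × Int)) : Decidable (Spec_detect_loops_in_sequence_py activity_sequence out) := by unfold Spec_detect_loops_in_sequence_py; infer_instance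

-- ===== CLAIM (what is proved, stated in full; the proofs are below) =====
def Claim_equal_detect_loops_in_sequence_py : Prop := ∀ (activity_sequence : List String), Dom_detect_loops_in_sequence_py activity_sequence → Spec_detect_loops_in_sequence_py activity_sequence (detect_loops_in_sequence_py activity_sequence)

-- ===== LEMMAS AND PROOFS =====

-- The grouping dict of B, looked up at activity a, is exactly the ascending list of indices holding a.
lemma pos_getD (as : List String) (a : String) :
    ((PySem.List.enumerate as 0).foldl (fun d p => d.modify p.2 [] (· ++ [p.1])) PySem.Dict.empty).getD a []
      = (PySem.List.pyRange 0 (PySem.List.len as) 1).filter (fun j => PySem.List.pyGetD as j "" == a) := by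
  have h1 : (PySem.List.enumerate as 0).foldl (fun d p => d.modify p.2 [] (· ++ [p.1])) PySem.Dict.empty
      = ((PySem.List.enumerate as 0).map (fun p => (p.2, p.1))).foldl
          (fun d p => d.modify p.1 [] (· ++ [p.2])) PySem.Dict.empty := by
    rw [List.foldl_map]
  rw [h1, PySem.Dict.getD_foldl_modify_append]
  simp [PySem.List.enumerate_eq_map_pyRange as "", List.filter_map, List.map_map, Function.comp_def]

-- Restricting to indices j ≥ i+2 lets the whole range 0..n be replaced by the tail i+1..n.
lemma range_tail (n i : Int) (h0 : 0 ≤ i) (hn : i < n) (q : Int → Bool) :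
    ((PySem.List.pyRange 0 n 1).filter (fun j => decide (i + 2 ≤ j) && q j))
      = (PySem.List.pyRange (i+1) n 1).filter (fun j => decide (i + 2 ≤ j) && q j) := by
  rw [PySem.List.pyRange_one_append 0 (i+1) n (by omega) (by omega), List.filter_append]
  have : (PySem.List.pyRange 0 (i+1) 1).filter (fun j => decide (i + 2 ≤ j) && q j) = [] := by
    rw [List.filter_eq_nil_iff]
    intro x hx
    have := (PySem.List.mem_pyRange_one).mp hx
    simp only [Bool.and_eq_true, decide_eq_true_eq]
    omega
  rw [this, List.nil_append]

theorem detect_loops_eq (as : List String) :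
    detect_loops_in_sequence_py as = detect_loops_in_sequence_py_alt as := by
  unfold detect_loops_in_sequence_py detect_loops_in_sequence_py_alt
  -- normalize both nested loops to append-of-filter form
  have hA : ∀ (i : Int) (acc : List (Int × Int)),
      (PySem.List.pyRange (i + 1) (PySem.List.len as) 1).foldl (fun loops e =>
        if PySem.List.pyGetD as e "" == PySem.List.pyGetD as i "" then
          if e - i ≥ 2 then loops ++ [(i, e)] else loops
        else loops) acc
      = acc ++ ((PySem.List.pyRange (i + 1) (PySem.List.len as) 1).filter
          (fun e => decide (i + 2 ≤ e) && (PySem.List.pyGetD as e "" == PySem.List.pyGetD as i ""))).map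
          (fun e => (i, e)) := by
    intro i acc
    rw [PySem.List.foldl_congr_mem _ _
        (fun loops e => if (decide (i + 2 ≤ e) && (PySem.List.pyGetD as e "" == PySem.List.pyGetD as i "")) = true
          then loops ++ [(i, e)] else loops) _ ?_]
    · exact PySem.List.foldl_append_if _ _ _ acc
    · intro acc' x _
      by_cases h1 : PySem.List.pyGetD as x "" == PySem.List.pyGetD as i ""
      · by_cases h2 : x - i ≥ 2
        · have h3 : i + 2 ≤ x := by omega
          simp [h1, h2, h3]
        · have h3 : ¬ (i + 2 ≤ x) := by omega
          simp [h1, h2, h3]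
      · simp only [h1, Bool.and_false, Bool.false_eq_true, if_false]
  have hB : ∀ (i : Int) (g : List Int) (acc : List (Int × Int)),
      g.foldl (fun loops j => if j ≥ i + 2 then loops ++ [(i, j)] else loops) acc
      = acc ++ (g.filter (fun j => decide (i + 2 ≤ j))).map (fun j => (i, j)) := by
    intro i g acc
    rw [PySem.List.foldl_congr_mem _ _
        (fun loops j => if decide (i + 2 ≤ j) = true then loops ++ [(i, j)] else loops) _ ?_]
    · exact PySem.List.foldl_append_if _ _ _ acc
    · intro acc' x _
      by_cases h : i + 2 ≤ x <;> simp [h, ge_iff_le]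
  simp only [hB]
  simp only [pos_getD]
  rw [PySem.List.foldl_congr_mem _ _
      (fun loops (i : Int) => loops ++ ((PySem.List.pyRange (i + 1) (PySem.List.len as) 1).filter
        (fun e => decide (i + 2 ≤ e) && (PySem.List.pyGetD as e "" == PySem.List.pyGetD as i ""))).map
        (fun e => (i, e))) _ (by intro acc i _; exact hA i acc)]
  rw [PySem.List.foldl_append_eq_flatMap, PySem.List.enumerate_eq_map_pyRange as "",
    List.foldl_map, PySem.List.foldl_append_eq_flatMap]
  congr 1
  apply List.flatMap_congr  -- pointwise on members
  intro i hi
  have hmem := (PySem.List.mem_pyRange_one).mp hi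
  dsimp only
  rw [List.filter_filter,
    range_tail (PySem.List.len as) i (by omega) (by simpa using hmem.2)
      (fun j => PySem.List.pyGetD as j "" == PySem.List.pyGetD as i "")]



-- ===== VERDICT (by name: the statement is the Claim_ definition above) =====
theorem detect_loops_in_sequence_py_spec : Claim_equal_detect_loops_in_sequence_py := by
  intro as _
  unfold Spec_detect_loops_in_sequence_py
  exact detect_loops_eq as
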